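-- pv_equiv track=rewrite | github.com/ProveVis/vmdvpy | src/services/messenger.py | matchJSONStr
-- ===== SOURCE A (Python) =====
-- def matchJSONStr(toBeMatched):
--     result = ('', toBeMatched)
--     if toBeMatched.startswith('{\"type\":'):
--         flag = 0
--         length = len(toBeMatched)
--         for i in range(length):
--             if toBeMatched[i] == '{':
--                 flag += 1
--             elif toBeMatched[i] == '}':
--                 flag -= 1
--             elif toBeMatched[i] == '\n' and flag == 0:
--                 result = (toBeMatched[0:i], toBeMatched[i+1:length])
--     return result
-- ===== SOURCE B (Python) =====
-- def matchJSONStr(toBeMatched):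
--     if not toBeMatched.startswith('{"type":'):
--         return ('', toBeMatched)
--     total = sum((c == '{') - (c == '}') for c in toBeMatched)
--     suf = 0
--     for i in range(len(toBeMatched) - 1, -1, -1):
--         c = toBeMatched[i]
--         if c == '\n':
--             if suf == total:
--                 return (toBeMatched[:i], toBeMatched[i + 1:])
--         elif c == '{':
--             suf += 1
--         elif c == '}':
--             suf -= 1
--     return ('', toBeMatched)
-- ===== Notes on version B (the rewrite author's own statement) =====
-- stated objective: alternative
-- what changed: Replaces A's forward scan that re-slices the result at every top-level newline with an early-return guard, a one-shot sum for the total brace balance, and a right-to-left scan that maintains a suffix balance (a newline is top-level iff suffix balance equals the total) and returns at the first hit from the right, slicing only once.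
import Mathlib
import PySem

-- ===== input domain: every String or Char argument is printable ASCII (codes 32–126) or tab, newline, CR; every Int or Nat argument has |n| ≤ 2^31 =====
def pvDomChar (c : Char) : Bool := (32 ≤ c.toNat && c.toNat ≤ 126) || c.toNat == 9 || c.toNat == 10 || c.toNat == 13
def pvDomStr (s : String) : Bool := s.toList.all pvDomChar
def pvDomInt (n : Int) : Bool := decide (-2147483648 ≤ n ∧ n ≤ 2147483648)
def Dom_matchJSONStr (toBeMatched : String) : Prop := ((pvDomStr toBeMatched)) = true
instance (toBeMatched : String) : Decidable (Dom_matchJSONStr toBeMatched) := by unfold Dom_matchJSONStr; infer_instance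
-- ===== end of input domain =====

-- B replaces A's forward scan (which re-slices the result at every top-level newline) with an
-- early-return guard, a one-shot sum for the total brace balance, and a right-to-left scan that
-- keeps a suffix balance and returns the index of the first qualifying newline from the right,
-- slicing only once. Same O(n) cost; a different decomposition/traversal.

-- ===== PORT A =====
-- A's for-loop over i in range(len): rem is the unprocessed suffix, i the index of its head.
def matchJSONStrGoA (all : List Char) (i : Nat) (rem : List Char) (flag : Int)
    (res : List Char × List Char) : List Char × List Char :=
  match rem with
  | [] => res
  | c :: rest =>
    if c = '{' then matchJSONStrGoA all (i + 1) rest (flag + 1) res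
    else if c = '}' then matchJSONStrGoA all (i + 1) rest (flag - 1) res
    else if c = '\n' ∧ flag = 0 then
      -- toBeMatched[0:i], toBeMatched[i+1:length]  (0 ≤ i < length, so take/drop are exact)
      matchJSONStrGoA all (i + 1) rest flag (all.take i, all.drop (i + 1))
    else matchJSONStrGoA all (i + 1) rest flag res

def matchJSONStr (toBeMatched : String) : String × String :=
  let cs := toBeMatched.toList
  let res :=
    if PySem.Chars.startswith cs "{\"type\":".toList then
      matchJSONStrGoA cs 0 cs 0 ([], cs)
    else ([], cs)
  (String.mk res.1, String.mk res.2)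

-- ===== PORT B =====
-- total = sum((c == '{') - (c == '}') for c in toBeMatched)
def matchJSONStrTotal (cs : List Char) : Int :=
  (cs.map (fun c => (if c = '{' then (1 : Int) else 0) - (if c = '}' then 1 else 0))).sum

-- B's loop over i in range(len-1, -1, -1): rrem holds the unprocessed chars in reverse order,
-- so its head is toBeMatched[i] with i = rrem.tail.length; 'return' becomes 'some i'.
def matchJSONStrFind (total : Int) : List Char → Int → Option Nat
  | [], _ => none
  | c :: r, suf =>
    if c = '\n' then
      if suf = total then some r.length else matchJSONStrFind total r suf
    else if c = '{' then matchJSONStrFind total r (suf + 1)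
    else if c = '}' then matchJSONStrFind total r (suf - 1)
    else matchJSONStrFind total r suf

def matchJSONStr_alt (toBeMatched : String) : String × String :=
  let cs := toBeMatched.toList
  if PySem.Chars.startswith cs "{\"type\":".toList then
    match matchJSONStrFind (matchJSONStrTotal cs) cs.reverse 0 with
    | some i => (String.mk (cs.take i), String.mk (cs.drop (i + 1)))
    | none => (String.mk [], String.mk cs)
  else (String.mk [], String.mk cs)

-- ===== PRECONDITION & SPEC =====
def Spec_matchJSONStr (toBeMatched : String) (out : String × String) : Prop := out = matchJSONStr_alt toBeMatched
instance (toBeMatched : String) (out : String × String) : Decidable (Spec_matchJSONStr toBeMatched out) := by unfold Spec_matchJSONStr; infer_instance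

-- ===== CLAIM (what is proved, stated in full; the proofs are below) =====
def Claim_equal_matchJSONStr : Prop := ∀ (toBeMatched : String), Dom_matchJSONStr toBeMatched → Spec_matchJSONStr toBeMatched (matchJSONStr toBeMatched)

-- ===== LEMMAS AND PROOFS =====

-- brace balance of a prefix (the value A's flag holds after processing it)
def matchJSONStrBal : List Char → Int
  | [] => 0
  | c :: r => (if c = '{' then (1 : Int) else if c = '}' then -1 else 0) + matchJSONStrBal r

theorem matchJSONStrBal_append_singleton (xs : List Char) (c : Char) :
    matchJSONStrBal (xs ++ [c]) =
      matchJSONStrBal xs + (if c = '{' then 1 else if c = '}' then -1 else 0) := by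
  induction xs with
  | nil => simp [matchJSONStrBal]
  | cons x rest ih => simp [matchJSONStrBal, ih]; ring

theorem matchJSONStrTotal_eq_bal (cs : List Char) :
    matchJSONStrTotal cs = matchJSONStrBal cs := by
  induction cs with
  | nil => simp [matchJSONStrTotal, matchJSONStrBal]
  | cons c rest ih =>
    simp only [matchJSONStrTotal, List.map_cons, List.sum_cons, matchJSONStrBal] at *
    rw [ih]
    split_ifs <;> simp_all <;> ring

-- A processes left-to-right, so the appended last char is handled last, with the flag
-- advanced by the balance of the preceding chars.
theorem matchJSONStrGoA_append (all : List Char) (xs : List Char) (c : Char) :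
    ∀ (i : Nat) (flag : Int) (res : List Char × List Char),
    matchJSONStrGoA all i (xs ++ [c]) flag res =
      if c = '{' then matchJSONStrGoA all i xs flag res
      else if c = '}' then matchJSONStrGoA all i xs flag res
      else if c = '\n' ∧ flag + matchJSONStrBal xs = 0 then
        (all.take (i + xs.length), all.drop (i + xs.length + 1))
      else matchJSONStrGoA all i xs flag res := by
  induction xs with
  | nil =>
    intro i flag res
    simp only [List.nil_append, matchJSONStrGoA, matchJSONStrBal, List.length_nil]
    by_cases h1 : c = '{'
    · simp [h1, matchJSONStrGoA]
    · by_cases h2 : c = '}'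
      · simp [h1, h2, matchJSONStrGoA]
      · simp only [if_neg h1, if_neg h2]
        by_cases h3 : c = '\n' ∧ flag + 0 = 0
        · have h3' : c = '\n' ∧ flag = 0 := ⟨h3.1, by omega⟩
          simp [h1, h2, h3', matchJSONStrGoA]
        · have h3' : ¬(c = '\n' ∧ flag = 0) := fun hh => h3 ⟨hh.1, by omega⟩
          simp [h1, h2, h3, h3', matchJSONStrGoA]
  | cons x rest ih =>
    intro i flag res
    simp only [List.cons_append, matchJSONStrGoA, matchJSONStrBal, List.length_cons]
    have hlen : i + 1 + rest.length = i + (rest.length + 1) := by omega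
    by_cases hx1 : x = '{'
    · simp only [if_pos hx1, hx1, ih]
      norm_num
      split_ifs <;> first | rfl | (exfalso; simp_all <;> omega) | rw [hlen]
    · by_cases hx2 : x = '}'
      · simp only [if_neg hx1, if_pos hx2, hx2, ih]
        norm_num
        split_ifs <;> first | rfl | (exfalso; simp_all <;> omega) | rw [hlen]
      · simp only [if_neg hx1, if_neg hx2]
        by_cases hx3 : x = '\n' ∧ flag = 0
        · simp only [if_pos hx3, ih]
          split_ifs <;> first | rfl | (exfalso; simp_all <;> omega) | rw [hlen]
        · simp only [if_neg hx3, ih]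
          split_ifs <;> first | rfl | (exfalso; simp_all <;> omega) | rw [hlen]

-- MAIN: interpreting B's right-to-left search result as a pair of slices equals A's
-- left-to-right scan, provided total - suf equals the balance of the unprocessed prefix xs.
theorem matchJSONStr_find_agree (all : List Char) (total : Int) :
    ∀ (xs : List Char) (suf : Int) (res : List Char × List Char),
      total - suf = matchJSONStrBal xs →
      (match matchJSONStrFind total xs.reverse suf with
       | some i => (all.take i, all.drop (i + 1))
       | none => res) = matchJSONStrGoA all 0 xs 0 res := by
  intro xs
  induction xs using List.reverseRecOn with
  | nil => intro suf res h; simp [matchJSONStrFind, matchJSONStrGoA]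
  | append_singleton ys c ih =>
    intro suf res h
    rw [matchJSONStrGoA_append]
    rw [matchJSONStrBal_append_singleton] at h
    have hrev : (ys ++ [c]).reverse = c :: ys.reverse := by simp
    rw [hrev]
    by_cases h1 : c = '{'
    · have hn : ¬ c = '\n' := by subst h1; decide
      simp only [matchJSONStrFind, if_neg hn, if_pos h1]
      exact ih (suf + 1) res (by simp [h1] at h; omega)
    · by_cases h2 : c = '}'
      · have hn : ¬ c = '\n' := by subst h2; decide
        simp only [matchJSONStrFind, if_neg hn, if_neg h1, if_pos h2]
        exact ih (suf - 1) res (by simp [h1, h2] at h; omega)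
      · have hb : total - suf = matchJSONStrBal ys := by simp [h1, h2] at h; omega
        by_cases h3 : c = '\n'
        · simp only [matchJSONStrFind, if_pos h3, if_neg h1, if_neg h2]
          by_cases h4 : suf = total
          · have e : c = '\n' ∧ (0 : Int) + matchJSONStrBal ys = 0 := ⟨h3, by omega⟩
            simp only [if_pos h4, if_pos e, List.length_reverse]
            simp
          · have e : ¬ (c = '\n' ∧ (0 : Int) + matchJSONStrBal ys = 0) := fun hh => h4 (by omega)
            simp only [if_neg h4, if_neg e]
            exact ih suf res hb
        · have e : ¬ (c = '\n' ∧ (0 : Int) + matchJSONStrBal ys = 0) := fun hh => h3 hh.1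
          simp only [matchJSONStrFind, if_neg h3, if_neg h1, if_neg h2, if_neg e]
          exact ih suf res hb

-- ===== VERDICT (by name: the statement is the Claim_ definition above) =====
theorem matchJSONStr_spec : Claim_equal_matchJSONStr := by
  intro s _
  unfold Spec_matchJSONStr matchJSONStr matchJSONStr_alt
  simp only
  split_ifs with h
  · rw [← matchJSONStr_find_agree s.toList (matchJSONStrTotal s.toList) s.toList 0 ([], s.toList)
      (by rw [matchJSONStrTotal_eq_bal]; ring)]
    cases matchJSONStrFind (matchJSONStrTotal s.toList) s.toList.reverse 0 <;> rfl
  · rfl
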